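-- pv_equiv track=rewrite | github.com/pan-x-c/AgentScope | examples/paper_provable_scaling_law/competitions/lucb.py | _check_stop
-- ===== SOURCE A (Python) =====
-- from typing import List, Tuple
--
-- def _check_stop(candidates: List, active_ids: List) -> bool:
--     """Check if the stop condition is satisfied."""
--     stop = True
--     for idx in active_ids:
--         if (
--             candidates[idx]["answer"]
--             != candidates[active_ids[0]]["answer"]
--         ):
--             stop = False
--             break
--     return stop
-- ===== SOURCE B (Python) =====
-- def _check_stop(candidates, active_ids):
--     """Check if the stop condition is satisfied."""
--     return len({candidates[idx]["answer"] for idx in active_ids}) <= 1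
-- ===== Notes on version B (the rewrite author's own statement) =====
-- stated objective: idiomatic
-- what changed: Replaces the scan-with-early-break comparing each active candidate's answer to the first one's by building the set of distinct answers of the active candidates and testing that it has at most one element.
-- outside the precondition, e.g. on _check_stop([{'answer': 'a'}, {'answer': 'b'}], [0, 1, 5]): A returns False, B raises IndexError
import Mathlib
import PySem

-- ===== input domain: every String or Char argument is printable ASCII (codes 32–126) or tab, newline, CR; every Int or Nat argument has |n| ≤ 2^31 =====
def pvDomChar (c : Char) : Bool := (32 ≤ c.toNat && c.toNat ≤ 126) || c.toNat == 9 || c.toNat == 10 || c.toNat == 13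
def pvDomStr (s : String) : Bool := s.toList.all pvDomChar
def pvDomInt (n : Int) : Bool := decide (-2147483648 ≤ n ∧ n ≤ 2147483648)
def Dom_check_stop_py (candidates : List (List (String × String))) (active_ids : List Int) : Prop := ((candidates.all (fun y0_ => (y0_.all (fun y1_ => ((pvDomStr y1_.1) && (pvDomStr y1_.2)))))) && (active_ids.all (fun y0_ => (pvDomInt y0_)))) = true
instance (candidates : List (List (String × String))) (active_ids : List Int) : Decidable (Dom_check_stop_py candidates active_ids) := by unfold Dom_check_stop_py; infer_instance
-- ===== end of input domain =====

-- B replaces A's scan comparing each active candidate's answer to the first's (with early break)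
-- by a uniqueness test: the set of distinct answers of active candidates has at most one element.

-- ===== PORT A =====
-- candidates[idx]["answer"]  (total form; exact under Pre_: index in range and key present)
def pvAnsA (candidates : List (List (String × String))) (idx : Int) : String :=
  (PySem.Dict.mk (PySem.List.pyGetD candidates idx [])).getD "answer" ""

-- the 'for idx in active_ids' loop with its early break
def pvCheckLoop (candidates : List (List (String × String))) (active_ids : List Int) :
    List Int → Bool
  | [] => true
  | idx :: rest =>
      if pvAnsA candidates idx ≠ pvAnsA candidates (PySem.List.pyGetD active_ids 0 0) then
        false
      else
        pvCheckLoop candidates active_ids rest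

def check_stop_py (candidates : List (List (String × String))) (active_ids : List Int) : Bool :=
  pvCheckLoop candidates active_ids active_ids

-- ===== PORT B =====
-- len({candidates[idx]["answer"] for idx in active_ids}) <= 1
def check_stop_py_alt (candidates : List (List (String × String))) (active_ids : List Int) : Bool :=
  decide ((PySem.Set.ofList (active_ids.map (fun idx =>
    (PySem.Dict.mk (PySem.List.pyGetD candidates idx [])).getD "answer" ""))).length ≤ 1)

-- ===== PRECONDITION & SPEC =====
-- Pre_ excludes exactly the inputs where candidates[idx] or ["answer"] raises for some
-- idx in active_ids: there A raises, or (when a mismatch breaks the loop before the bad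
-- index) A returns False while B's set build still hits the IndexError/KeyError and raises.
def Pre_check_stop_py (candidates : List (List (String × String))) (active_ids : List Int) : Prop :=
  active_ids.all (fun idx =>
    match PySem.List.pyGet? candidates idx with
    | none => false
    | some d => ((PySem.Dict.mk d).get? "answer").isSome) = true
instance (candidates : List (List (String × String))) (active_ids : List Int) : Decidable (Pre_check_stop_py candidates active_ids) := by unfold Pre_check_stop_py; infer_instance

def pvWitness_check_stop_py : (List (List (String × String))) × List Int :=
  ([[("answer", "a")], [("answer", "b")]], [0, 0])

def Spec_check_stop_py (candidates : List (List (String × String))) (active_ids : List Int) (out : Bool) : Prop := out = check_stop_py_alt candidates active_ids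
instance (candidates : List (List (String × String))) (active_ids : List Int) (out : Bool) : Decidable (Spec_check_stop_py candidates active_ids out) := by unfold Spec_check_stop_py; infer_instance

-- ===== CLAIM (what is proved, stated in full; the proofs are below) =====
def Claim_equal_check_stop_py : Prop := ∀ (candidates : List (List (String × String))) (active_ids : List Int), Dom_check_stop_py candidates active_ids → Pre_check_stop_py candidates active_ids → Spec_check_stop_py candidates active_ids (check_stop_py candidates active_ids)

-- ===== LEMMAS AND PROOFS =====

-- A's loop is an 'all elements' test (the early break is invisible in the value)
theorem pvCheckLoop_eq_all (c : List (List (String × String))) (ids : List Int)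
    (l : List Int) :
    pvCheckLoop c ids l =
      l.all (fun idx => pvAnsA c idx == pvAnsA c (PySem.List.pyGetD ids 0 0)) := by
  induction l with
  | nil => rfl
  | cons x xs ih =>
      simp only [pvCheckLoop, List.all_cons, ih]
      by_cases h : pvAnsA c x = pvAnsA c (PySem.List.pyGetD ids 0 0) <;> simp [h]

-- if every element of ys equals a, folding Set.add over ys leaves a set containing a fixed
theorem foldl_add_of_all_eq (a : String) (ys : List String) (s : PySem.Set String)
    (hs : a ∈ s) (h : ∀ y ∈ ys, y = a) :
    ys.foldl PySem.Set.add s = s := by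
  induction ys with
  | nil => rfl
  | cons y ys ih =>
      have hy : y = a := h y (by simp)
      have hadd : PySem.Set.add s y = s := by simp [PySem.Set.add, hy, hs]
      simp only [List.foldl_cons, hadd]
      exact ih (fun y hy' => h y (by simp [hy']))

-- a duplicate-free list with two distinct members has length ≥ 2
theorem two_le_length_of_nodup {α : Type} (l : List α) (x y : α)
    (hnd : l.Nodup) (hx : x ∈ l) (hy : y ∈ l) (hxy : x ≠ y) : 2 ≤ l.length := by
  match l, hx, hy with
  | [a], hx, hy =>
      simp at hx hy; exact absurd (hx.trans hy.symm) hxy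
  | a :: b :: t, _, _ => simp

-- the uniqueness test over a :: ys holds iff every element of ys equals a
theorem set_len_le_one (a : String) (ys : List String) :
    ((PySem.Set.ofList (a :: ys)).length ≤ 1) ↔ ∀ y ∈ ys, y = a := by
  constructor
  · intro hlen y hy
    by_contra hya
    have hmem_y : y ∈ PySem.Set.ofList (a :: ys) := by
      rw [PySem.Set.mem_ofList]; simp [hy]
    have hmem_a : a ∈ PySem.Set.ofList (a :: ys) := by
      rw [PySem.Set.mem_ofList]; simp
    have h2 := two_le_length_of_nodup _ y a (PySem.Set.nodup_ofList _) hmem_y hmem_a hya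
    omega
  · intro h
    have h1 : PySem.Set.ofList (a :: ys) = [a] := by
      rw [PySem.Set.ofList_eq_foldl]
      simp only [List.foldl_cons]
      exact foldl_add_of_all_eq a ys (PySem.Set.add PySem.Set.empty a)
        (by simp [PySem.Set.add, PySem.Set.empty]) h
    simp [h1]

-- ===== VERDICT (by name: the statement is the Claim_ definition above) =====
theorem check_stop_py_spec : Claim_equal_check_stop_py := by
  intro candidates active_ids _ _
  unfold Spec_check_stop_py check_stop_py check_stop_py_alt
  rw [pvCheckLoop_eq_all]
  cases active_ids with
  | nil => rfl
  | cons i0 rest =>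
      have h0 : PySem.List.pyGetD (i0 :: rest) 0 0 = i0 := by
        simp [PySem.List.pyGetD_zero_cons]
      rw [h0]
      show ((i0 :: rest).all fun idx => pvAnsA candidates idx == pvAnsA candidates i0) =
        decide ((PySem.Set.ofList ((i0 :: rest).map
          (fun idx => pvAnsA candidates idx))).length ≤ 1)
      simp only [List.map_cons, List.all_cons, beq_self_eq_true, Bool.true_and]
      rw [Bool.eq_iff_iff]
      simp only [List.all_eq_true, decide_eq_true_eq, set_len_le_one, List.mem_map,
        beq_iff_eq]
      constructor
      · rintro h y ⟨x, hx, rfl⟩; exact h x hx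
      · intro h x hx; exact h (pvAnsA candidates x) ⟨x, hx, rfl⟩
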